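-- pv_equiv track=rewrite | github.com/Dtcsrni/Sistema_Operativo_Tesis_Publico | 07_scripts/serena_policy.py | strongest_write_scope
-- ===== SOURCE A (Python) =====
-- def strongest_write_scope(scopes: list[str]) -> str:
--     order = {"read_only": 0, "derived": 1, "controlled": 2, "protected": 3, "blocked": 4}
--     highest = "read_only"
--     best_value = -1
--     for scope in scopes:
--         current = order.get(scope, -1)
--         if current > best_value:
--             best_value = current
--             highest = scope
--     return highest
-- ===== SOURCE B (Python) =====
-- def strongest_write_scope(scopes: list[str]) -> str:
--     for scope in ("blocked", "protected", "controlled", "derived", "read_only"):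
--         if scope in scopes:
--             return scope
--     return "read_only"
-- ===== Notes on version B (the rewrite author's own statement) =====
-- stated objective: simpler
-- what changed: B traverses the fixed priority ranking from strongest to weakest and returns the first scope present in the input, instead of scanning the input while maintaining a running best value and name; unknown scopes are ignored and empty input falls through to "read_only".
import Mathlib
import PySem

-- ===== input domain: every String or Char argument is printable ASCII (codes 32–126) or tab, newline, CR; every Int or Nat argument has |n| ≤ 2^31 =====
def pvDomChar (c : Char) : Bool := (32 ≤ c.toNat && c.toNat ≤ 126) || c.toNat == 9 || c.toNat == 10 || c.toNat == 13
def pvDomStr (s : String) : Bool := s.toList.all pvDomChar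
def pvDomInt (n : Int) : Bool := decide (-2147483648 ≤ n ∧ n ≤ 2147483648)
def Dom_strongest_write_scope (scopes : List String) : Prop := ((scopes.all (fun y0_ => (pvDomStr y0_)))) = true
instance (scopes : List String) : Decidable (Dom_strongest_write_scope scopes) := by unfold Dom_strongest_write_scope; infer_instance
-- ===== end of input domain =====

-- B loops over the fixed priority ranking (strongest first) and returns the first scope present
-- in the input, instead of scanning the input with a running best value: simpler, same cost.

-- ===== PORT A =====
def swsOrder : PySem.Dict String Int :=
  PySem.Dict.ofList [("read_only", 0), ("derived", 1), ("controlled", 2), ("protected", 3), ("blocked", 4)]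

def strongest_write_scope (scopes : List String) : String :=
  (scopes.foldl
      (fun st scope =>
        let current := swsOrder.getD scope (-1)
        if current > st.2 then (scope, current) else st)
      ("read_only", -1)).1

-- ===== PORT B =====
def swsRanking : List String := ["blocked", "protected", "controlled", "derived", "read_only"]

def swsFirstPresent (scopes : List String) : List String → String
  | [] => "read_only"
  | s :: rest => if scopes.contains s then s else swsFirstPresent scopes rest

def strongest_write_scope_alt (scopes : List String) : String :=
  swsFirstPresent scopes swsRanking

-- ===== PRECONDITION & SPEC =====
def Spec_strongest_write_scope (scopes : List String) (out : String) : Prop := out = strongest_write_scope_alt scopes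
instance (scopes : List String) (out : String) : Decidable (Spec_strongest_write_scope scopes out) := by unfold Spec_strongest_write_scope; infer_instance

-- ===== CLAIM (what is proved, stated in full; the proofs are below) =====
def Claim_equal_strongest_write_scope : Prop := ∀ (scopes : List String), Dom_strongest_write_scope scopes → Spec_strongest_write_scope scopes (strongest_write_scope scopes)

-- ===== LEMMAS AND PROOFS =====

-- the scope → priority map, as an if-chain (proof-side view of the dict lookup)
def swsVal (s : String) : Int :=
  if s = "read_only" then 0 else if s = "derived" then 1 else if s = "controlled" then 2
  else if s = "protected" then 3 else if s = "blocked" then 4 else -1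

-- the inverse direction: priority value → scope name
def swsName (m : Int) : String :=
  if m = 4 then "blocked" else if m = 3 then "protected" else if m = 2 then "controlled"
  else if m = 1 then "derived" else "read_only"

theorem swsVal_eq_getD (s : String) : swsOrder.getD s (-1) = swsVal s := by
  have hit : swsOrder.items = [("read_only", 0), ("derived", 1), ("controlled", 2), ("protected", 3), ("blocked", 4)] := by decide
  unfold swsVal
  split_ifs with h1 h2 h3 h4 h5
  · subst h1; decide
  · subst h2; decide
  · subst h3; decide
  · subst h4; decide
  · subst h5; decide
  · simp [PySem.Dict.getD, PySem.Dict.get?, hit, beq_iff_eq,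
      Ne.symm h1, Ne.symm h2, Ne.symm h3, Ne.symm h4, Ne.symm h5]

theorem swsVal_le_four (s : String) : swsVal s ≤ 4 := by
  unfold swsVal; split_ifs <;> omega

theorem swsName_swsVal (s : String) (h : 0 ≤ swsVal s) : swsName (swsVal s) = s := by
  unfold swsVal at *
  split_ifs at h <;> simp_all [swsName]

theorem swsVal_eq_name {s : String} {k : Int} (hk : 0 ≤ k) (h : swsVal s = k) : s = swsName k := by
  subst h; exact (swsName_swsVal s hk).symm

-- the max-fold over priorities
def swsMax (b : Int) (l : List String) : Int := l.foldl (fun a s => max a (swsVal s)) b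

theorem swsMax_ge (l : List String) : ∀ b : Int, b ≤ swsMax b l := by
  induction l with
  | nil => intro b; simp [swsMax]
  | cons s l ih =>
      intro b
      have := ih (max b (swsVal s))
      simp only [swsMax, List.foldl_cons] at *
      exact le_trans (le_max_left _ _) this

theorem swsMax_mem_le (l : List String) : ∀ b : Int, ∀ s ∈ l, swsVal s ≤ swsMax b l := by
  induction l with
  | nil => intro b s hs; simp at hs
  | cons t l ih =>
      intro b s hs
      rcases List.mem_cons.mp hs with hs | hs
      · subst hs
        have := swsMax_ge l (max b (swsVal s))
        simp only [swsMax, List.foldl_cons] at *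
        exact le_trans (le_max_right _ _) this
      · exact ih (max b (swsVal t)) s hs

theorem swsMax_cases (l : List String) : ∀ b : Int, swsMax b l = b ∨ ∃ s ∈ l, swsVal s = swsMax b l := by
  induction l with
  | nil => intro b; left; rfl
  | cons t l ih =>
      intro b
      rcases ih (max b (swsVal t)) with h | ⟨s, hs, hv⟩
      · simp only [swsMax, List.foldl_cons] at *
        by_cases hb : swsVal t ≤ b
        · left; rw [h]; omega
        · right; exact ⟨t, List.mem_cons_self, by rw [h]; omega⟩
      · right; exact ⟨s, List.mem_cons_of_mem _ hs, by simpa [swsMax] using hv⟩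

-- A's loop, characterised: the result is the carried name if nothing beats b, else the name of the max
theorem loopA_eq (l : List String) : ∀ (h : String) (b : Int), -1 ≤ b → (0 ≤ b → swsVal h = b) →
    (l.foldl
        (fun st scope =>
          let current := swsOrder.getD scope (-1)
          if current > st.2 then (scope, current) else st)
        (h, b)).1
    = if swsMax b l = b then h else swsName (swsMax b l) := by
  induction l with
  | nil => intro h b _ _; simp [swsMax]
  | cons s l ih =>
      intro h b hb hh
      have hstep : (let current := swsOrder.getD s (-1)
            if current > (h, b).2 then (s, current) else (h, b))
          = if swsVal s > b then (s, swsVal s) else (h, b) := by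
        simp [swsVal_eq_getD]
      rw [List.foldl_cons, hstep]
      by_cases hgt : swsVal s > b
      · have h0 : 0 ≤ swsVal s := by omega
        have hmax : max b (swsVal s) = swsVal s := by omega
        rw [if_pos hgt, ih s (swsVal s) (by omega) (fun _ => rfl)]
        have hme : swsMax b (s :: l) = swsMax (swsVal s) l := by
          simp [swsMax, hmax]
        rw [hme]
        have hge := swsMax_ge l (swsVal s)
        by_cases he : swsMax (swsVal s) l = swsVal s
        · rw [if_pos he, if_neg (by omega), he, swsName_swsVal s h0]
        · rw [if_neg he, if_neg (by omega)]
      · have hmax : max b (swsVal s) = b := by omega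
        rw [if_neg hgt]
        have hme : swsMax b (s :: l) = swsMax b l := by simp [swsMax, hmax]
        rw [ih h b hb hh, hme]

theorem mem_of_swsMax {l : List String} {k : Int} (hk : 0 ≤ k) (h : swsMax (-1) l = k) :
    swsName k ∈ l := by
  rcases swsMax_cases l (-1) with h0 | ⟨s, hs, hv⟩
  · omega
  · rw [h] at hv
    rwa [← swsVal_eq_name hk hv]

theorem swsMax_le_four (l : List String) : swsMax (-1) l ≤ 4 := by
  rcases swsMax_cases l (-1) with h | ⟨s, _, hv⟩
  · omega
  · rw [← hv]; exact swsVal_le_four s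

-- ===== VERDICT (by name: the statement is the Claim_ definition above) =====
theorem strongest_write_scope_spec : Claim_equal_strongest_write_scope := by
  intro scopes _
  unfold Spec_strongest_write_scope strongest_write_scope strongest_write_scope_alt swsRanking
  rw [loopA_eq scopes "read_only" (-1) (by omega) (by omega)]
  have hm4 := swsMax_le_four scopes
  have hmge := swsMax_ge scopes (-1)
  by_cases c4 : "blocked" ∈ scopes
  · have h1 : (4 : Int) ≤ swsMax (-1) scopes := by
      simpa [swsVal] using swsMax_mem_le scopes (-1) _ c4
    have hm' : swsMax (-1) scopes = 4 := by omega
    simp [swsFirstPresent, c4, hm', swsName]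
  · have hne4 : swsMax (-1) scopes ≠ 4 := fun h => c4 (by simpa [swsName] using mem_of_swsMax (by omega) h)
    by_cases c3 : "protected" ∈ scopes
    · have h1 : (3 : Int) ≤ swsMax (-1) scopes := by
        simpa [swsVal] using swsMax_mem_le scopes (-1) _ c3
      have hm' : swsMax (-1) scopes = 3 := by omega
      simp [swsFirstPresent, c4, c3, hm', swsName]
    · have hne3 : swsMax (-1) scopes ≠ 3 := fun h => c3 (by simpa [swsName] using mem_of_swsMax (by omega) h)
      by_cases c2 : "controlled" ∈ scopes
      · have h1 : (2 : Int) ≤ swsMax (-1) scopes := by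
          simpa [swsVal] using swsMax_mem_le scopes (-1) _ c2
        have hm' : swsMax (-1) scopes = 2 := by omega
        simp [swsFirstPresent, c4, c3, c2, hm', swsName]
      · have hne2 : swsMax (-1) scopes ≠ 2 := fun h => c2 (by simpa [swsName] using mem_of_swsMax (by omega) h)
        by_cases c1 : "derived" ∈ scopes
        · have h1 : (1 : Int) ≤ swsMax (-1) scopes := by
            simpa [swsVal] using swsMax_mem_le scopes (-1) _ c1
          have hm' : swsMax (-1) scopes = 1 := by omega
          simp [swsFirstPresent, c4, c3, c2, c1, hm', swsName]
        · have hne1 : swsMax (-1) scopes ≠ 1 := fun h => c1 (by simpa [swsName] using mem_of_swsMax (by omega) h)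
          by_cases c0 : "read_only" ∈ scopes
          · have h1 : (0 : Int) ≤ swsMax (-1) scopes := by
              simpa [swsVal] using swsMax_mem_le scopes (-1) _ c0
            have hm' : swsMax (-1) scopes = 0 := by omega
            simp [swsFirstPresent, c4, c3, c2, c1, c0, hm', swsName]
          · have hne0 : swsMax (-1) scopes ≠ 0 := fun h => c0 (by simpa [swsName] using mem_of_swsMax (by omega) h)
            have hm' : swsMax (-1) scopes = -1 := by omega
            simp [swsFirstPresent, c4, c3, c2, c1, c0, hm']
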